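-- pv_equiv track=rewrite | github.com/Dibrary/Algorithm_playground | Codility/FrogRiverOne.py | solution
-- ===== SOURCE A (Python) =====
-- def solution(X, A):
--     tmp = set()
--
--     for idx, k in enumerate(A):
--         if k == X:
--             table = list(tmp)
--             flag = True
--             table.sort()
--             for index, m in enumerate(table):
--                 if index != 0:
--                     if m - table[index - 1] == 1:
--                         continue
--                     else:
--                         flag = False
--                         break
--             if flag == True:
--                 return idx
--         else:
--             tmp.add(k)
-- ===== SOURCE B (Python) =====
-- def solution(X, A):
--     seen = set()
--     lo = hi = None
--     for idx, k in enumerate(A):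
--         if k == X:
--             # distinct values form a consecutive run iff max-min == count-1
--             if not seen or hi - lo == len(seen) - 1:
--                 return idx
--         elif k not in seen:
--             seen.add(k)
--             if lo is None or k < lo:
--                 lo = k
--             if hi is None or k > hi:
--                 hi = k
-- ===== Notes on version B (the rewrite author's own statement) =====
-- stated objective: alternative
-- what changed: Instead of copying the accumulated set to a list, sorting it and scanning adjacent differences at every occurrence of X, B maintains the set's size, minimum and maximum incrementally and tests contiguity via max-min == size-1; it trades the per-occurrence sort-and-scan for a constant amount of extra bookkeeping on every element.
import Mathlib
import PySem

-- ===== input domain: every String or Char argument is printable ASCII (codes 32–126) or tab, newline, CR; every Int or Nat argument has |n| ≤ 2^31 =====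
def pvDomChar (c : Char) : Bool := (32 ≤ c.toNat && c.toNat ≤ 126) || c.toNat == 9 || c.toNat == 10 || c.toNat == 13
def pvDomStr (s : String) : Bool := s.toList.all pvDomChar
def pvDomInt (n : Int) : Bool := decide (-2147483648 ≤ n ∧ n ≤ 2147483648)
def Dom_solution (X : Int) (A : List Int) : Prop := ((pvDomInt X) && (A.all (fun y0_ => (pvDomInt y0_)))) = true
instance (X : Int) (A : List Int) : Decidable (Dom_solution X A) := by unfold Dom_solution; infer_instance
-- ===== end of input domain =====

-- B replaces A's per-occurrence sort-and-scan contiguity test by incrementally tracked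
-- size/min/max of the accumulated set, checked via max - min == size - 1 (objective: alternative algorithm).

-- ===== PORT A =====
-- A's inner loop over enumerate(sorted table): checks every adjacent difference is 1, breaking on failure
def solutionChain : List Int → Bool
  | [] => true
  | [_] => true
  | a :: b :: rest => if b - a == 1 then solutionChain (b :: rest) else false

-- A's main loop (list(tmp) is set-iteration order, but it is sorted immediately, so the result is order-independent)
def solutionGo (X : Int) : List (Int × Int) → PySem.Set Int → Option Int
  | [], _ => none
  | (idx, k) :: rest, tmp =>
    if k == X then
      if solutionChain (PySem.List.sorted tmp (fun x => x) false) then some idx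
      else solutionGo X rest tmp
    else solutionGo X rest (PySem.Set.add tmp k)

def solution (X : Int) (A : List Int) : Option Int :=
  solutionGo X (PySem.List.enumerate A 0) PySem.Set.empty

-- ===== PORT B =====
-- B's loop: seen set plus running min (lo) / max (hi); lo/hi are only read when seen is nonempty
-- ('not seen or …' short-circuits in Source B), so getD 0 never supplies its default to the comparison.
def solutionAltGo (X : Int) : List (Int × Int) → PySem.Set Int → Option Int → Option Int → Option Int
  | [], _, _, _ => none
  | (idx, k) :: rest, seen, lo, hi =>
    if k == X then
      if seen.isEmpty || (hi.getD 0 - lo.getD 0 == (seen.length : Int) - 1) then some idx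
      else solutionAltGo X rest seen lo hi
    else if PySem.Set.contains seen k then solutionAltGo X rest seen lo hi
    else
      let lo' := match lo with | none => k | some l => if k < l then k else l
      let hi' := match hi with | none => k | some h => if h < k then k else h
      solutionAltGo X rest (seen ++ [k]) (some lo') (some hi')

def solution_alt (X : Int) (A : List Int) : Option Int :=
  solutionAltGo X (PySem.List.enumerate A 0) PySem.Set.empty none none

-- ===== PRECONDITION & SPEC =====
def Spec_solution (X : Int) (A : List Int) (out : Option Int) : Prop := out = solution_alt X A
instance (X : Int) (A : List Int) (out : Option Int) : Decidable (Spec_solution X A out) := by unfold Spec_solution; infer_instance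

-- ===== CLAIM (what is proved, stated in full; the proofs are below) =====
def Claim_equal_solution : Prop := ∀ (X : Int) (A : List Int), Dom_solution X A → Spec_solution X A (solution X A)

-- ===== LEMMAS AND PROOFS =====

-- lo/hi are exactly a witnessing minimum/maximum of the accumulated set (none iff it is empty)
-- a ≤-pairwise list is bounded above by its last element
theorem pairwise_le_getLast : ∀ (t : List Int) (hne : t ≠ []), t.Pairwise (· ≤ ·) →
    ∀ y ∈ t, y ≤ t.getLast hne := by
  intro t
  induction t with
  | nil => intro hne; simp at hne
  | cons a t' ih =>
    intro hne ht y hy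
    cases t' with
    | nil =>
      simp only [List.mem_singleton] at hy
      subst hy
      simp
    | cons b r =>
      rw [List.getLast_cons (by simp)]
      rcases List.mem_cons.1 hy with rfl | hy'
      · exact (List.pairwise_cons.1 ht).1 _ (List.getLast_mem (by simp))
      · exact ih (by simp) (List.pairwise_cons.1 ht).2 y hy'

def solInv (tmp : List Int) (lo hi : Option Int) : Prop :=
  (tmp = [] ∧ lo = none ∧ hi = none) ∨
  (∃ l h, lo = some l ∧ hi = some h ∧ l ∈ tmp ∧ h ∈ tmp ∧ ∀ x ∈ tmp, l ≤ x ∧ x ≤ h)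

-- A strictly increasing nonempty list passes A's adjacent-difference scan iff last - head = length - 1,
-- and last - head is always at least length - 1.
theorem chain_char (t : List Int) (a : Int) (hp : (a :: t).Pairwise (· < ·)) :
    (solutionChain (a :: t) = true ↔
      (a :: t).getLast (by simp) - a = (t.length : Int)) ∧
    (t.length : Int) ≤ (a :: t).getLast (by simp) - a := by
  induction t generalizing a with
  | nil => simp [solutionChain]
  | cons b r ih =>
    have hab : a < b := (List.pairwise_cons.1 hp).1 b (by simp)
    have hp' : (b :: r).Pairwise (· < ·) := (List.pairwise_cons.1 hp).2
    have ihb := ih b hp'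
    have hlast : (a :: b :: r).getLast (by simp) = (b :: r).getLast (by simp) := by
      simp [List.getLast_cons]
    constructor
    · rw [hlast]
      by_cases h1 : b - a = 1
      · simp only [solutionChain, h1]
        rw [if_pos (by simp)]
        rw [ihb.1]
        constructor <;> intro h <;> push_cast [List.length_cons] at * <;> omega
      · simp only [solutionChain]
        rw [if_neg (by simpa using h1)]
        have := ihb.2
        constructor <;> intro h
        · simp at h
        · exfalso; push_cast [List.length_cons] at *; omega
    · rw [hlast]
      have := ihb.2
      push_cast [List.length_cons] at *; omega

-- the two loop tests agree: A's sort-and-scan equals B's max-min==size-1 check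
theorem check_eq (tmp : List Int) (lo hi : Option Int)
    (hnd : tmp.Nodup) (hinv : solInv tmp lo hi) :
    solutionChain (PySem.List.sorted tmp (fun x => x) false) =
      (tmp.isEmpty || (hi.getD 0 - lo.getD 0 == (tmp.length : Int) - 1)) := by
  rcases hinv with ⟨he, hl, hh⟩ | ⟨l, h, hl, hh, hlm, hhm, hb⟩
  · subst he hl hh
    simp [PySem.List.sorted, solutionChain]
  · have hne : tmp ≠ [] := fun hc => by subst hc; simp at hlm
    have hperm := PySem.List.sorted_perm tmp (fun x : Int => x) false
    have htne : PySem.List.sorted tmp (fun x => x) false ≠ [] := by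
      intro hc
      have hl0 := hperm.length_eq
      rw [hc] at hl0
      exact hne (List.length_eq_zero_iff.1 hl0.symm)
    obtain ⟨m, t', hmt⟩ := List.exists_cons_of_ne_nil htne
    rw [hmt] at hperm
    have hple : (m :: t').Pairwise (· ≤ ·) := by
      have hsp := PySem.List.sorted_pairwise tmp (fun x : Int => x)
      rw [hmt] at hsp
      simpa using hsp
    have hndt : (m :: t').Nodup := hperm.nodup_iff.2 hnd
    have hplt : (m :: t').Pairwise (· < ·) :=
      (hple.and hndt).imp (fun ⟨h1, h2⟩ => lt_of_le_of_ne h1 h2)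
    have hmmin : ∀ y ∈ tmp, m ≤ y := by
      intro y hy
      simpa using PySem.List.key_head_sorted_le tmp (fun x => x) hmt y hy
    have hmem_m : m ∈ tmp := hperm.subset (by simp)
    have hml : m = l := le_antisymm (hmmin l hlm) ((hb m hmem_m).1)
    have hlast_mem : (m :: t').getLast (by simp) ∈ tmp :=
      hperm.subset (List.getLast_mem (by simp))
    have hlast_max : ∀ y ∈ (m :: t'), y ≤ (m :: t').getLast (by simp) :=
      pairwise_le_getLast (m :: t') (by simp) hple
    have hgl : (m :: t').getLast (by simp) = h :=
      le_antisymm ((hb _ hlast_mem).2) (hlast_max h (hperm.mem_iff.2 hhm))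
    have hlen' : (t'.length : Int) = (tmp.length : Int) - 1 := by
      have hl0 := hperm.length_eq
      simp only [List.length_cons] at hl0
      push_cast [← hl0]; ring
    have hch := chain_char t' m hplt
    rw [hmt]
    have hise : tmp.isEmpty = false := by simpa using hne
    rw [hise, hl, hh]
    simp only [Bool.false_or, Option.getD_some]
    by_cases hc : h - l = (tmp.length : Int) - 1
    · have hT : solutionChain (m :: t') = true := hch.1.2 (by rw [hgl, hml] at *; omega)
      rw [hT]; simp [hc]
    · have hF : solutionChain (m :: t') ≠ true := by
        intro hT
        have := hch.1.1 hT
        rw [hgl, hml] at *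
        omega
      simp only [Bool.not_eq_true] at hF
      rw [hF]
      simp [hc]

-- the main loops agree from any state satisfying the invariant
theorem go_eq (X : Int) (rest : List (Int × Int)) :
    ∀ (tmp : List Int) (lo hi : Option Int), tmp.Nodup → solInv tmp lo hi →
      solutionGo X rest tmp = solutionAltGo X rest tmp lo hi := by
  induction rest with
  | nil => intro tmp lo hi _ _; rfl
  | cons p rest ih =>
    intro tmp lo hi hnd hinv
    obtain ⟨idx, k⟩ := p
    simp only [solutionGo, solutionAltGo]
    by_cases hkX : k == X
    · rw [if_pos hkX, if_pos hkX, check_eq tmp lo hi hnd hinv]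
      by_cases hc : (tmp.isEmpty || (hi.getD 0 - lo.getD 0 == (tmp.length : Int) - 1)) = true
      · rw [if_pos hc, if_pos hc]
      · rw [if_neg hc, if_neg hc]; exact ih tmp lo hi hnd hinv
    · rw [if_neg hkX, if_neg hkX]
      by_cases hmem : PySem.Set.contains tmp k
      · rw [if_pos hmem]
        have hkmem : k ∈ tmp := by simpa [PySem.Set.contains] using hmem
        have : PySem.Set.add tmp k = tmp := by simp [PySem.Set.add, hkmem]
        rw [this]; exact ih tmp lo hi hnd hinv
      · rw [if_neg hmem]
        have hknot : k ∉ tmp := by simpa [PySem.Set.contains] using hmem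
        have hadd : PySem.Set.add tmp k = tmp ++ [k] := by
          simp [PySem.Set.add, hknot]
        rw [hadd]
        have hnd' : (tmp ++ [k]).Nodup := by
          refine List.nodup_append.2 ⟨hnd, by simp, ?_⟩
          intro a ha b hbmem hab
          have hb' : b = k := by simpa using hbmem
          subst hab
          exact hknot (hb' ▸ ha)
        rcases hinv with ⟨he, hl, hh⟩ | ⟨l, h, hl, hh, hlm, hhm, hb⟩
        · subst he hl hh
          apply ih
          · simp only [List.nil_append] at hnd'
            exact hnd'
          · right; exact ⟨k, k, rfl, rfl, by simp, by simp, by simp⟩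
        · subst hl hh
          apply ih _ _ _ hnd'
          right
          refine ⟨if k < l then k else l, if h < k then k else h, rfl, rfl, ?_, ?_, ?_⟩
          · by_cases hkl : k < l <;> simp [hkl, hlm]
          · by_cases hhk : h < k <;> simp [hhk, hhm]
          · intro x hx
            rcases List.mem_append.1 hx with hx | hx
            · have := hb x hx
              constructor
              · by_cases hkl : k < l <;> simp [hkl] <;> omega
              · by_cases hhk : h < k <;> simp [hhk] <;> omega
            · simp only [List.mem_singleton] at hx
              have hlh := hb l hlm
              constructor
              · by_cases hkl : k < l <;> simp [hkl, hx] <;> omega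
              · by_cases hhk : h < k <;> simp [hhk, hx] <;> omega

-- ===== VERDICT (by name: the statement is the Claim_ definition above) =====
theorem solution_spec : Claim_equal_solution := by
  intro X A _
  unfold Spec_solution solution solution_alt
  exact go_eq X (PySem.List.enumerate A 0) [] none none (by simp) (Or.inl ⟨rfl, rfl, rfl⟩)
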